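-- pv_equiv track=rewrite | github.com/ztjona/codeforces_solver | 279B - Books/go.py | solve
-- ===== SOURCE A (Python) =====
-- def solve(nums, t:int)->int:
--     '''
--     ############################################### '''
--     n = len(nums)
--
--     maxTam = 0
--
--     resp = []
--     lastI = -1
--
--     for idx, val in enumerate(nums):
--         # loop by initial idx
--         if idx == 0:
--             suma = 0
--         else:
--             suma -= nums[idx - 1]
--
--         suma2 = suma
--         for idxLast in range(lastI + 1, n):
--             # loop by final idx
--             suma2 += nums[idxLast]
--             if suma2 <= t:
--                 suma = suma2
--                 lastI = idxLast
--             else: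
--                 break
--         tam = lastI - idx + 1
--         # resp.append(tam)
--         if maxTam < tam:
--             maxTam = tam
--     return maxTam
-- ===== SOURCE B (Python) =====
-- def solve(nums, t: int) -> int:
--     n = len(nums)
--     P = [0]
--     s = 0
--     for x in nums:
--         s += x
--         P.append(s)
--     best = 0
--     for i in range(n):
--         target = t + P[i]
--         lo, hi = i, n
--         while lo < hi:
--             mid = (lo + hi) // 2
--             if P[mid + 1] <= target:
--                 lo = mid + 1
--             else:
--                 hi = mid
--         length = lo - i
--         if length > best:
--             best = length
--     return best
-- ===== Notes on version B (the rewrite author's own statement) =====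
-- stated objective: alternative
-- what changed: Replaced A's stateful two-pointer sweep (a shared advancing end index with an incrementally maintained window sum) by a prefix-sum table plus, for each start index, a binary search for the rightmost prefix value <= t + P[i]; equivalence holds on the natural domain of non-negative book reading times, where prefix sums are monotone.
-- outside the precondition, e.g. on solve([-1, -2], -2): A returns 0, B returns 2
import Mathlib
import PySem

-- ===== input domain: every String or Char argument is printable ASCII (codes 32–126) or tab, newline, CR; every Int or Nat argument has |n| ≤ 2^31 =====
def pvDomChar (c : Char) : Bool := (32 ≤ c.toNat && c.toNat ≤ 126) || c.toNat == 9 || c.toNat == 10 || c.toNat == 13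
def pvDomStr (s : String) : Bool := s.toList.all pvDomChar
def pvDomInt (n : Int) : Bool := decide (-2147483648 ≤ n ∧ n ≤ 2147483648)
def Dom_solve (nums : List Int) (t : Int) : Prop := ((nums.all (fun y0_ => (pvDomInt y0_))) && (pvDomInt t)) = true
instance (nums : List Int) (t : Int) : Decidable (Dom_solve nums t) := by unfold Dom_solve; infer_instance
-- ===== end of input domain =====

-- B replaces A's stateful two-pointer sweep by a prefix-sum table plus a binary search per
-- start index; the two agree on the natural domain of non-negative reading times (Pre_solve).

-- ===== PORT A =====
-- inner loop 'for idxLast in range(lastI + 1, n): …' with break; state (suma, suma2, lastI)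
def innerA (nums : List Int) (t : Int) (n : Nat) (k : Nat) (suma suma2 lastI : Int) : Int × Int :=
  if _h : k < n then
    let suma2' := suma2 + nums.getD k 0   -- nums[idxLast], 0 ≤ idxLast < n: exact
    if suma2' ≤ t then innerA nums t n (k + 1) suma2' suma2' (k : Int)
    else (suma, lastI)
  else (suma, lastI)
termination_by n - k
decreasing_by omega

-- outer loop 'for idx, val in enumerate(nums): …'; (lastI + 1).toNat is exact because
-- lastI ≥ -1 throughout execution (range(lastI+1, n) in Python)
def outerA (nums : List Int) (t : Int) (n : Nat) (idx : Nat) (suma lastI maxTam : Int) : Int :=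
  if _h : idx < n then
    let suma' := if idx = 0 then 0 else suma - nums.getD (idx - 1) 0  -- nums[idx-1], in range: exact
    let r := innerA nums t n (lastI + 1).toNat suma' suma' lastI
    let tam := r.2 - (idx : Int) + 1
    let maxTam' := if maxTam < tam then tam else maxTam
    outerA nums t n (idx + 1) r.1 r.2 maxTam'
  else maxTam
termination_by n - idx
decreasing_by omega

def solve (nums : List Int) (t : Int) : Int :=
  outerA nums t nums.length 0 0 (-1) 0

-- ===== PORT B =====
-- P = [0]; s = 0; for x in nums: s += x; P.append(s)
def buildP (nums : List Int) : List Int :=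
  (nums.foldl (fun (st : List Int × Int) x => (st.1 ++ [st.2 + x], st.2 + x)) ([0], 0)).1

-- while lo < hi: mid = (lo+hi)//2; if P[mid+1] <= target: lo = mid+1 else: hi = mid
def bsearchB (P : List Int) (target : Int) (lo hi : Nat) : Nat :=
  if _h : lo < hi then
    let mid := (lo + hi) / 2
    if P.getD (mid + 1) 0 ≤ target then bsearchB P target (mid + 1) hi  -- P[mid+1], in range: exact
    else bsearchB P target lo mid
  else lo
termination_by hi - lo
decreasing_by all_goals omega

def outerB (P : List Int) (t : Int) (n i : Nat) (best : Int) : Int :=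
  if _h : i < n then
    let lo := bsearchB P (t + P.getD i 0) i n   -- P[i], in range: exact
    let len := (lo : Int) - (i : Int)
    let best' := if len > best then len else best
    outerB P t n (i + 1) best'
  else best
termination_by n - i
decreasing_by omega

def solve_alt (nums : List Int) (t : Int) : Int :=
  outerB (buildP nums) t nums.length 0 0

-- ===== PRECONDITION & SPEC =====
-- Pre_solve restricts to the task's natural domain (book reading times are non-negative);
-- on lists with negative elements A's pointer sweep and B's binary search both return, but
-- B's prefix sums are no longer monotone and the values may differ (see the claim's cite).
def Pre_solve (nums : List Int) (t : Int) : Prop := ∀ x ∈ nums, 0 ≤ x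
instance (nums : List Int) (t : Int) : Decidable (Pre_solve nums t) := by
  unfold Pre_solve; infer_instance

def pvWitness_solve : List Int × Int := ([1, 2, 3], 4)

def Spec_solve (nums : List Int) (t : Int) (out : Int) : Prop := out = solve_alt nums t
instance (nums : List Int) (t : Int) (out : Int) : Decidable (Spec_solve nums t out) := by
  unfold Spec_solve; infer_instance

-- ===== CLAIM (what is proved, stated in full; the proofs are below) =====
def Claim_equal_solve : Prop := ∀ (nums : List Int) (t : Int), Dom_solve nums t → Pre_solve nums t → Spec_solve nums t (solve nums t)

-- ===== LEMMAS AND PROOFS =====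

-- prefix sum of the first k elements
def pref (nums : List Int) (k : Nat) : Int := (nums.take k).sum

-- first index j ≥ k (capped at n) whose window prefix violates: target < pref (j+1)
def fvA (nums : List Int) (target : Int) (n k : Nat) : Nat :=
  if _h : k < n then (if target < pref nums (k + 1) then k else fvA nums target n (k + 1)) else n
termination_by n - k
decreasing_by omega

lemma pref_zero (nums : List Int) : pref nums 0 = 0 := by simp [pref]

lemma pref_succ (nums : List Int) (k : Nat) (h : k < nums.length) :
    pref nums (k + 1) = pref nums k + nums.getD k 0 := by
  unfold pref
  rw [List.sum_take_succ nums k h, List.getD_eq_getElem nums 0 h]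

lemma pref_step_le (nums : List Int) (hnn : ∀ x ∈ nums, 0 ≤ x) (k : Nat) :
    pref nums k ≤ pref nums (k + 1) := by
  by_cases h : k < nums.length
  · rw [pref_succ nums k h]
    have : nums.getD k 0 ∈ nums := by
      rw [List.getD_eq_getElem?_getD, List.getElem?_eq_getElem h]
      exact List.getElem_mem h
    have := hnn _ this
    omega
  · simp [pref, List.take_of_length_le (by omega : nums.length ≤ k),
      List.take_of_length_le (by omega : nums.length ≤ k + 1)]

lemma pref_mono (nums : List Int) (hnn : ∀ x ∈ nums, 0 ≤ x) {j k : Nat} (h : j ≤ k) :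
    pref nums j ≤ pref nums k := by
  induction k with
  | zero => simp_all
  | succ k ih =>
    rcases Nat.lt_or_ge j (k + 1) with h' | h'
    · exact le_trans (ih (by omega)) (pref_step_le nums hnn k)
    · have : j = k + 1 := by omega
      simp [this]

-- characterisation of fvA
lemma fvA_spec (nums : List Int) (target : Int) (n : Nat) :
    ∀ k, k ≤ n →
      k ≤ fvA nums target n k ∧ fvA nums target n k ≤ n ∧
      (∀ j, k ≤ j → j < fvA nums target n k → pref nums (j + 1) ≤ target) ∧
      (fvA nums target n k < n → target < pref nums (fvA nums target n k + 1)) := by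
  have H : ∀ d k, n - k = d → k ≤ n →
      k ≤ fvA nums target n k ∧ fvA nums target n k ≤ n ∧
      (∀ j, k ≤ j → j < fvA nums target n k → pref nums (j + 1) ≤ target) ∧
      (fvA nums target n k < n → target < pref nums (fvA nums target n k + 1)) := by
    intro d
    induction d with
    | zero =>
      intro k hd hk
      have hkn : k = n := by omega
      subst hkn
      rw [fvA, dif_neg (lt_irrefl k)]
      exact ⟨le_rfl, le_rfl, fun j h1 h2 => absurd h2 (by omega),
        fun h => absurd h (lt_irrefl k)⟩
    | succ d ih =>
      intro k hd hk
      have hkn : k < n := by omega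
      rw [fvA, dif_pos hkn]
      by_cases hc : target < pref nums (k + 1)
      · rw [if_pos hc]
        exact ⟨le_rfl, by omega, fun j h1 h2 => absurd h2 (by omega), fun _ => hc⟩
      · rw [if_neg hc]
        obtain ⟨ih1, ih2, ih3, ih4⟩ := ih (k + 1) (by omega) (by omega)
        refine ⟨by omega, ih2, ?_, ih4⟩
        intro j h1 h2
        rcases Nat.eq_or_lt_of_le h1 with h | h
        · subst h; exact not_lt.mp hc
        · exact ih3 j h h2
  intro k hk
  exact H (n - k) k rfl hk

lemma fvA_unique (nums : List Int) (target : Int) (n : Nat) :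
    ∀ k r, k ≤ r → r ≤ n →
      (∀ j, k ≤ j → j < r → pref nums (j + 1) ≤ target) →
      (r < n → target < pref nums (r + 1)) →
      fvA nums target n k = r := by
  have H : ∀ d k r, r - k = d → k ≤ r → r ≤ n →
      (∀ j, k ≤ j → j < r → pref nums (j + 1) ≤ target) →
      (r < n → target < pref nums (r + 1)) → fvA nums target n k = r := by
    intro d
    induction d with
    | zero =>
      intro k r hd hkr hrn hok hviol
      have hkr' : k = r := by omega
      subst hkr'
      by_cases hkn : k < n
      · rw [fvA, dif_pos hkn, if_pos (hviol hkn)]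
      · rw [fvA, dif_neg hkn]; omega
    | succ d ih =>
      intro k r hd hkr hrn hok hviol
      have hkn : k < n := by omega
      rw [fvA, dif_pos hkn,
        if_neg (not_lt.mpr (hok k le_rfl (by omega)))]
      exact ih (k + 1) r (by omega) (by omega) hrn
        (fun j hj1 hj2 => hok j (by omega) hj2) hviol
  intro k r hkr hrn hok hviol
  exact H (r - k) k r rfl hkr hrn hok hviol

-- buildP computes the prefix sums
def preListH (s : Int) : List Int → List Int
  | [] => []
  | x :: xs => (s + x) :: preListH (s + x) xs

lemma foldl_build (xs : List Int) : ∀ (l : List Int) (s : Int),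
    (xs.foldl (fun (st : List Int × Int) x => (st.1 ++ [st.2 + x], st.2 + x)) (l, s)) =
      (l ++ preListH s xs, s + xs.sum) := by
  induction xs with
  | nil => intro l s; simp [preListH]
  | cons x xs ih =>
    intro l s
    simp only [List.foldl_cons, ih, preListH, List.sum_cons]
    refine Prod.ext ?_ ?_
    · simp
    · simp; ring

lemma preListH_getD (xs : List Int) : ∀ s k, k < xs.length →
    (preListH s xs).getD k 0 = s + pref xs (k + 1) := by
  induction xs with
  | nil => intro s k h; simp at h
  | cons x xs ih =>
    intro s k h
    cases k with
    | zero => simp [preListH, pref]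
    | succ k =>
      have hk : k < xs.length := by simpa using h
      simp only [preListH, List.getD_cons_succ, ih (s + x) k hk, pref, List.take_succ_cons,
        List.sum_cons]
      ring

lemma buildP_getD (nums : List Int) : ∀ k, k ≤ nums.length →
    (buildP nums).getD k 0 = pref nums k := by
  intro k hk
  unfold buildP
  rw [foldl_build]
  cases k with
  | zero => simp [pref]
  | succ k =>
    have hk' : k < nums.length := by omega
    have := preListH_getD nums 0 k hk'
    simp only [List.cons_append, List.nil_append, List.getD_cons_succ]
    omega

-- binary search finds the first violating index
lemma bsearch_eq (nums : List Int) (target : Int) (hnn : ∀ x ∈ nums, 0 ≤ x) (f i : Nat)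
    (hif : i ≤ f) (hfn : f ≤ nums.length)
    (hok : ∀ j, i ≤ j → j < f → pref nums (j + 1) ≤ target)
    (hviol : f < nums.length → target < pref nums (f + 1)) :
    ∀ lo hi, i ≤ lo → lo ≤ hi → hi ≤ nums.length → lo ≤ f → f ≤ hi →
      bsearchB (buildP nums) target lo hi = f := by
  have H : ∀ d lo hi, hi - lo ≤ d → i ≤ lo → lo ≤ hi → hi ≤ nums.length → lo ≤ f → f ≤ hi →
      bsearchB (buildP nums) target lo hi = f := by
    intro d
    induction d with
    | zero =>
      intro lo hi hd _ _ _ h4 h5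
      rw [bsearchB, dif_neg (by omega : ¬ lo < hi)]
      omega
    | succ d ih =>
      intro lo hi hd h1 h2 h3 h4 h5
      by_cases hlh : lo < hi
      case neg => rw [bsearchB, dif_neg hlh]; omega
      rw [bsearchB, dif_pos hlh]
      dsimp only
      have hmid1 : lo ≤ (lo + hi) / 2 := by omega
      have hmid2 : (lo + hi) / 2 < hi := by omega
      rw [buildP_getD nums ((lo + hi) / 2 + 1) (by omega)]
      by_cases hc : pref nums ((lo + hi) / 2 + 1) ≤ target
      · rw [if_pos hc]
        have hm : (lo + hi) / 2 < f := by
          by_contra hcon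
          push Not at hcon
          have hfn' : f < nums.length := by omega
          have hv := hviol hfn'
          have hmono := pref_mono nums hnn (show f + 1 ≤ (lo + hi) / 2 + 1 by omega)
          omega
        exact ih ((lo + hi) / 2 + 1) hi (by omega) (by omega) (by omega) h3 (by omega) h5
      · rw [if_neg hc]
        have hm : f ≤ (lo + hi) / 2 := by
          by_contra hcon
          push Not at hcon
          exact hc (hok _ (by omega) (by omega))
        exact ih lo ((lo + hi) / 2) (by omega) h1 (by omega) (by omega) h4 hm
  intro lo hi h1 h2 h3 h4 h5
  exact H (hi - lo) lo hi le_rfl h1 h2 h3 h4 h5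

lemma inner_eq (nums : List Int) (t c : Int) :
    ∀ k, k ≤ nums.length → ∀ suma lastI : Int,
      suma = pref nums k - c → lastI = (k : Int) - 1 →
      innerA nums t nums.length k suma suma lastI =
        (pref nums (fvA nums (t + c) nums.length k) - c,
          (fvA nums (t + c) nums.length k : Int) - 1) := by
  have H : ∀ d k, nums.length - k = d → k ≤ nums.length → ∀ suma lastI : Int,
      suma = pref nums k - c → lastI = (k : Int) - 1 →
      innerA nums t nums.length k suma suma lastI =
        (pref nums (fvA nums (t + c) nums.length k) - c,
          (fvA nums (t + c) nums.length k : Int) - 1) := by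
    intro d
    induction d with
    | zero =>
      intro k hd hk suma lastI hs hl
      have hkn : k = nums.length := by omega
      rw [innerA, dif_neg (by omega : ¬ k < nums.length),
        fvA, dif_neg (by omega : ¬ k < nums.length)]
      rw [hs, hl, hkn]
    | succ d ih =>
      intro k hd hk suma lastI hs hl
      have hkn : k < nums.length := by omega
      have hstep := pref_succ nums k hkn
      rw [innerA, dif_pos hkn]
      dsimp only
      rw [fvA, dif_pos hkn]
      by_cases hc : t + c < pref nums (k + 1)
      · rw [if_neg (show ¬ suma + nums.getD k 0 ≤ t by omega), if_pos hc, hs, hl]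
      · rw [if_pos (show suma + nums.getD k 0 ≤ t by omega), if_neg hc]
        have h2 : suma + nums.getD k 0 = pref nums (k + 1) - c := by omega
        rw [h2]
        exact ih (k + 1) (by omega) (by omega) _ _ rfl (by push_cast; ring)
  intro k hk suma lastI hs hl
  exact H (nums.length - k) k rfl hk suma lastI hs hl


-- the main induction: A's sweep and B's per-start binary searches agree
lemma outer_eq (nums : List Int) (t : Int) (hnn : ∀ x ∈ nums, 0 ≤ x) :
    ∀ i, i ≤ nums.length → ∀ suma lastI maxTam : Int,
      -1 ≤ lastI → lastI ≤ (nums.length : Int) - 1 →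
      (i = 0 → lastI = -1) →
      (i ≠ 0 → suma = pref nums (lastI + 1).toNat - pref nums (i - 1)) →
      (∀ j : Nat, i ≤ j → (j : Int) ≤ lastI → pref nums (j + 1) ≤ t + pref nums i) →
      0 ≤ maxTam →
      outerA nums t nums.length i suma lastI maxTam =
        outerB (buildP nums) t nums.length i maxTam := by
  have H : ∀ d i, nums.length - i ≤ d → i ≤ nums.length → ∀ suma lastI maxTam : Int,
      -1 ≤ lastI → lastI ≤ (nums.length : Int) - 1 →
      (i = 0 → lastI = -1) →
      (i ≠ 0 → suma = pref nums (lastI + 1).toNat - pref nums (i - 1)) →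
      (∀ j : Nat, i ≤ j → (j : Int) ≤ lastI → pref nums (j + 1) ≤ t + pref nums i) →
      0 ≤ maxTam →
      outerA nums t nums.length i suma lastI maxTam =
        outerB (buildP nums) t nums.length i maxTam := by
    intro d
    induction d with
    | zero =>
      intro i hd hi suma lastI maxTam _ _ _ _ _ _
      rw [outerA, dif_neg (by omega : ¬ i < nums.length),
        outerB, dif_neg (by omega : ¬ i < nums.length)]
    | succ d ih =>
      intro i hd hi suma lastI maxTam hL1 hL2 hz hs hok hmax
      by_cases hin : i < nums.length
      case neg => rw [outerA, dif_neg hin, outerB, dif_neg hin]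
      rw [outerA, dif_pos hin, outerB, dif_pos hin]
      dsimp only
      set k0 : Nat := (lastI + 1).toNat with hk0def
      have hk0 : (k0 : Int) = lastI + 1 := by
        rw [hk0def]; exact Int.toNat_of_nonneg (by omega)
      have hk0n : k0 ≤ nums.length := by omega
      have hsuma' : (if i = 0 then (0:Int) else suma - nums.getD (i - 1) 0)
          = pref nums k0 - pref nums i := by
        by_cases h0 : i = 0
        · have hl0 := hz h0
          have hk00 : k0 = 0 := by omega
          rw [if_pos h0, h0, hk00, pref_zero]
          ring
        · rw [if_neg h0, hs h0]
          have hstep := pref_succ nums (i - 1) (by omega)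
          have hii : i - 1 + 1 = i := by omega
          rw [hii] at hstep
          omega
      rw [hsuma']
      have hlast : lastI = (k0 : Int) - 1 := by omega
      rw [inner_eq nums t (pref nums i) k0 hk0n _ _ rfl hlast]
      obtain ⟨hm1, hm2, hmok, hmviol⟩ :=
        fvA_spec nums (t + pref nums i) nums.length k0 hk0n
      obtain ⟨hf1, hf2, hfok, hfviol⟩ :=
        fvA_spec nums (t + pref nums i) nums.length i (by omega)
      set m := fvA nums (t + pref nums i) nums.length k0 with hmdef
      set f := fvA nums (t + pref nums i) nums.length i with hfdef
      rw [buildP_getD nums i (by omega)]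
      rw [bsearch_eq nums (t + pref nums i) hnn f i hf1 hf2 hfok hfviol
        i nums.length le_rfl (by omega) le_rfl hf1 hf2]
      dsimp only
      by_cases him : i ≤ m
      · have hokim : ∀ j, i ≤ j → j < m → pref nums (j + 1) ≤ t + pref nums i := by
          intro j hj1 hj2
          by_cases hcase : (j : Int) ≤ lastI
          · exact hok j hj1 hcase
          · exact hmok j (by omega) hj2
        have hmf : f = m := by
          rw [hfdef]
          exact fvA_unique nums (t + pref nums i) nums.length i m him hm2 hokim hmviol
        have hacc : (if maxTam < (m:Int) - 1 - (i:Int) + 1 then (m:Int) - 1 - (i:Int) + 1 else maxTam)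
            = (if (f:Int) - (i:Int) > maxTam then (f:Int) - (i:Int) else maxTam) := by
          rw [hmf]; split_ifs <;> omega
        rw [hacc]
        exact ih (i + 1) (by omega) (by omega) _ _ _ (by omega) (by omega) (by omega)
          (by intro _
              have e1 : ((m:Int) - 1 + 1).toNat = m := by omega
              have e2 : i + 1 - 1 = i := by omega
              rw [e1, e2])
          (by intro j hj1 hj2
              have hj2' : j < m := by omega
              have h1 := hokim j (by omega) hj2'
              have h2 := pref_step_le nums hnn i
              omega)
          (by split_ifs <;> omega)
      · have hmi : m < i := by omega
        have hfi : f = i := by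
          rw [hfdef]
          refine fvA_unique nums (t + pref nums i) nums.length i i le_rfl (by omega)
            (fun j hj1 hj2 => absurd hj2 (by omega)) ?_
          intro _
          have hv := hmviol (by omega)
          have hmono := pref_mono nums hnn (show m + 1 ≤ i by omega)
          have hstep := pref_step_le nums hnn i
          omega
        have hacc : (if maxTam < (m:Int) - 1 - (i:Int) + 1 then (m:Int) - 1 - (i:Int) + 1 else maxTam)
            = (if (f:Int) - (i:Int) > maxTam then (f:Int) - (i:Int) else maxTam) := by
          rw [hfi]; split_ifs <;> omega
        rw [hacc]
        exact ih (i + 1) (by omega) (by omega) _ _ _ (by omega) (by omega) (by omega)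
          (by intro _
              have e1 : ((m:Int) - 1 + 1).toNat = m := by omega
              have e2 : i + 1 - 1 = i := by omega
              rw [e1, e2])
          (by intro j hj1 hj2
              exact absurd hj2 (by omega))
          (by split_ifs <;> omega)
  intro i hi suma lastI maxTam hL1 hL2 hz hs hok hmax
  exact H (nums.length - i) i le_rfl hi suma lastI maxTam hL1 hL2 hz hs hok hmax

-- ===== VERDICT (by name: the statement is the Claim_ definition above) =====
theorem solve_spec : Claim_equal_solve := by
  intro nums t _dom hpre
  unfold Spec_solve solve solve_alt
  exact outer_eq nums t hpre 0 (by omega) 0 (-1) 0 (by omega) (by omega)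
    (fun _ => rfl) (fun h => absurd rfl h) (by intro j h1 h2; omega) (by omega)
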